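-- pv_equiv track=rewrite | github.com/Deserve82/KK_Algorithm_Study | Kangho/pro_kakao_bad_users.py | get_bad_users
-- ===== SOURCE A (Python) =====
-- def get_bad_users(user_ids, banned_id):
--     results = []
--     for user_id in user_ids:
--         is_bad = True
--         if len(user_id) != len(banned_id):
--             continue
--         else:
--             for a, b in zip(user_id, banned_id):
--                 if b == '*' or a == b:
--                     continue
--                 else:
--                     is_bad = False
--                     break
--         if is_bad:
--             results.append(user_id)
--     return results
-- ===== SOURCE B (Python) =====
-- import re
--
--
-- def get_bad_users(user_ids, banned_id):
--     # '*' matches any single character (including '\n', hence [\s\S]);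
--     # everything else is escaped so it matches literally. fullmatch
--     # enforces that lengths agree, since every token consumes one char.
--     pattern = re.compile(
--         ''.join('[\\s\\S]' if c == '*' else re.escape(c) for c in banned_id))
--     return [u for u in user_ids if pattern.fullmatch(u)]
-- ===== Notes on version B (the rewrite author's own statement) =====
-- stated objective: idiomatic
-- what changed: Compiles banned_id once into a regex ('*' becomes the single-character wildcard [\s\S], other characters are re.escape'd) and filters user_ids with pattern.fullmatch, delegating the per-character scan and the length check to the regex engine instead of A's explicit zip loop with a flag and break.
import Mathlib
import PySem

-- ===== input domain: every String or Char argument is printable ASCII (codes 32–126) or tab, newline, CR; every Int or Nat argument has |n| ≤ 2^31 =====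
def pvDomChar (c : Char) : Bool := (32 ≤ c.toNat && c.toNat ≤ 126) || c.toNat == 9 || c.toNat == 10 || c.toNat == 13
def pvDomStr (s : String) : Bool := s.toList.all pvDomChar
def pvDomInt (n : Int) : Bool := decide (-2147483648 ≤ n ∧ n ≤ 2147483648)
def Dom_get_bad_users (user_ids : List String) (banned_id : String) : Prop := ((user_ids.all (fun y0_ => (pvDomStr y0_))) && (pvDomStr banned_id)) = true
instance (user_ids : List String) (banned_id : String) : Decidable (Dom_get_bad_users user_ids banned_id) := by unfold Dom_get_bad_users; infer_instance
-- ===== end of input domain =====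

-- B compiles banned_id once into a regex ('*' → single-char wildcard, other chars escaped)
-- and filters user_ids with fullmatch, delegating the scan to the regex engine (objective: idiomatic).

-- ===== PORT A =====
-- inner 'for a, b in zip(user_id, banned_id)' loop: returns the final value of is_bad
def pvInnerA : List (Char × Char) → Bool
  | [] => true
  | (a, b) :: rest => if b = '*' ∨ a = b then pvInnerA rest else false

def get_bad_users (user_ids : List String) (banned_id : String) : List String :=
  user_ids.foldl (fun results user_id =>
    if PySem.Str.len user_id ≠ PySem.Str.len banned_id then results
    else if pvInnerA (user_id.toList.zip banned_id.toList) then results ++ [user_id]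
    else results) []

-- ===== PORT B =====
-- Hand port of the regex machinery Source B uses, exact on this pattern class: the compiled
-- pattern is a sequence of one-character tokens ('[\s\S]' for '*', an escaped literal
-- otherwise), and re.fullmatch of such a sequence consumes exactly one character per
-- token, succeeding iff every token matches and the whole string is consumed.
inductive pvTok
  | any : pvTok
  | lit : Char → pvTok
deriving DecidableEq, Repr

-- ''.join('[\s\S]' if c == '*' else re.escape(c) for c in banned_id), as a token list
def pvCompile : List Char → List pvTok
  | [] => []
  | c :: rest => (if c = '*' then pvTok.any else pvTok.lit c) :: pvCompile rest

-- pattern.fullmatch(u): every token matches one char, and nothing is left over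
def pvFullmatch : List pvTok → List Char → Bool
  | [], [] => true
  | pvTok.any :: ts, _ :: cs => pvFullmatch ts cs
  | pvTok.lit b :: ts, a :: cs => if a = b then pvFullmatch ts cs else false
  | _, _ => false

def get_bad_users_alt (user_ids : List String) (banned_id : String) : List String :=
  user_ids.filter (fun u => pvFullmatch (pvCompile banned_id.toList) u.toList)

-- ===== PRECONDITION & SPEC =====
def Spec_get_bad_users (user_ids : List String) (banned_id : String) (out : List String) : Prop := out = get_bad_users_alt user_ids banned_id
instance (user_ids : List String) (banned_id : String) (out : List String) : Decidable (Spec_get_bad_users user_ids banned_id out) := by unfold Spec_get_bad_users; infer_instance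

-- ===== CLAIM (what is proved, stated in full; the proofs are below) =====
def Claim_equal_get_bad_users : Prop := ∀ (user_ids : List String) (banned_id : String), Dom_get_bad_users user_ids banned_id → Spec_get_bad_users user_ids banned_id (get_bad_users user_ids banned_id)

-- ===== LEMMAS AND PROOFS =====

-- the compiled matcher succeeds exactly when the lengths agree and A's early-exit scan passes
theorem pvFullmatch_eq (ys xs : List Char) :
    pvFullmatch (pvCompile ys) xs
      = (decide (xs.length = ys.length) && pvInnerA (xs.zip ys)) := by
  induction ys generalizing xs with
  | nil =>
    cases xs with
    | nil => simp [pvCompile, pvFullmatch, pvInnerA]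
    | cons a cs => simp [pvCompile, pvFullmatch]
  | cons b ys ih =>
    cases xs with
    | nil => simp [pvCompile, pvFullmatch]
    | cons a cs =>
      by_cases hb : b = '*'
      · simp [pvCompile, pvFullmatch, pvInnerA, hb, ih]
      · by_cases hab : a = b
        · simp [pvCompile, pvFullmatch, pvInnerA, hb, hab, ih]
        · simp [pvCompile, pvFullmatch, pvInnerA, hb, hab]

theorem pvStep_eq (banned_id : String) (r : List String) (u : String) :
    (if PySem.Str.len u ≠ PySem.Str.len banned_id then r
     else if pvInnerA (u.toList.zip banned_id.toList) then r ++ [u] else r)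
    = (if pvFullmatch (pvCompile banned_id.toList) u.toList = true then r ++ [u] else r) := by
  rw [pvFullmatch_eq]
  by_cases hlen : u.length = banned_id.length
  · have hlen' : u.toList.length = banned_id.toList.length := by
      simp [String.length_toList, hlen]
    by_cases hin : pvInnerA (u.toList.zip banned_id.toList) = true
    · simp [hlen', hin]
    · simp [hlen', hin]
  · have hlen' : ¬ u.toList.length = banned_id.toList.length := by
      simpa [String.length_toList] using hlen
    simp [hlen]

-- ===== VERDICT (by name: the statement is the Claim_ definition above) =====
theorem get_bad_users_spec : Claim_equal_get_bad_users := by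
  intro user_ids banned_id _
  unfold Spec_get_bad_users get_bad_users get_bad_users_alt
  have := PySem.List.foldl_append_if_eq_filter
    (l := user_ids) (acc := ([] : List String))
    (p := fun u => pvFullmatch (pvCompile banned_id.toList) u.toList)
  rw [show (fun (results : List String) (user_id : String) =>
      if PySem.Str.len user_id ≠ PySem.Str.len banned_id then results
      else if pvInnerA (user_id.toList.zip banned_id.toList) then results ++ [user_id]
      else results)
    = (fun results user_id =>
      if pvFullmatch (pvCompile banned_id.toList) user_id.toList = true
      then results ++ [user_id] else results) from
    funext fun r => funext fun u => pvStep_eq banned_id r u]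
  simpa using this
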